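-- pv_equiv track=rewrite | github.com/goriazarashi-ui/sns-engine | scripts/post_instagram.py | parse_instagram_template
-- ===== SOURCE A (Python) =====
-- def parse_instagram_template(template_str: str) -> tuple[str, str]:
--     """
--     テンプレート文字列から caption と text を分離する。
--     caption: ... / text: ... の形式でなければ全文をキャプションとして扱う。
--     戻り値: (caption, image_text)
--     """
--     caption = ""
--     image_text = ""
--     current_key = None
--     current_lines = []
--
--     for line in template_str.splitlines():
--         if line.startswith("caption:"):
--             if current_key == "text":
--                 image_text = "\n".join(current_lines).strip()
--             current_key = "caption"
--             rest = line[len("caption:"):].strip()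
--             current_lines = [rest] if rest else []
--         elif line.startswith("text:"):
--             if current_key == "caption":
--                 caption = "\n".join(current_lines).strip()
--             current_key = "text"
--             rest = line[len("text:"):].strip()
--             current_lines = [rest] if rest else []
--         else:
--             current_lines.append(line)
--
--     if current_key == "caption":
--         caption = "\n".join(current_lines).strip()
--     elif current_key == "text":
--         image_text = "\n".join(current_lines).strip()
--
--     # caption/text 記法がなければ全文をキャプションに
--     if not caption and not image_text:
--         caption = template_str.strip()
--
--     return caption, image_text
-- ===== SOURCE B (Python) =====
-- def parse_instagram_template(template_str: str) -> tuple[str, str]: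
--     # One pass collecting (key, lines) blocks; select last block per key afterwards.
--     blocks = []
--     for line in template_str.splitlines():
--         if line.startswith("caption:"):
--             rest = line[len("caption:"):].strip()
--             blocks.append(("caption", [rest] if rest else []))
--         elif line.startswith("text:"):
--             rest = line[len("text:"):].strip()
--             blocks.append(("text", [rest] if rest else []))
--         elif blocks:
--             blocks[-1][1].append(line)
--
--     def last_value(key):
--         for k, lines in reversed(blocks):
--             if k == key:
--                 return "\n".join(lines).strip()
--         return ""
--
--     caption = last_value("caption")
--     image_text = last_value("text")
--     if not caption and not image_text:
--         caption = template_str.strip()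
--     return caption, image_text
-- ===== Notes on version B (the rewrite author's own statement) =====
-- stated objective: simpler
-- what changed: Instead of interleaving flushes of accumulators at every key switch and at the end, B collects (key, lines) blocks in one pass and afterwards picks the last block per key; same single-pass cost.
import Mathlib
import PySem

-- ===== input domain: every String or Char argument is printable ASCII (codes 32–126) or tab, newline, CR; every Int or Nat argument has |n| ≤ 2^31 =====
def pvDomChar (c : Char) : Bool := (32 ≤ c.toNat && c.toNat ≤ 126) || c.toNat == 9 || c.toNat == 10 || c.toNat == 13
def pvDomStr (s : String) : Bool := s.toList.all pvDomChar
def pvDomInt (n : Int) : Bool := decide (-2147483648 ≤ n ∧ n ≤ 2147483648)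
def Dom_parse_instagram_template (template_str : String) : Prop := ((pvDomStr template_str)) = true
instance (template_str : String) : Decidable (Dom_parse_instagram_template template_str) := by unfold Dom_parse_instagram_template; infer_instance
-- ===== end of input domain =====

-- B replaces A's interleaved accumulator flushes with one pass collecting (key, lines) blocks
-- and a deferred last-block-per-key selection; objective: simpler decomposition, same cost.


-- ===== PORT A =====
-- state: (caption, image_text, current_key, current_lines)
def pvAStep (st : String × String × Option String × List String) (line : String) :
    String × String × Option String × List String :=
  let (caption, image_text, current_key, current_lines) := st
  if PySem.Str.startswith line "caption:" then
    let image_text := if current_key = some "text" then PySem.Str.strip (PySem.Str.join "\n" current_lines) else image_text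
    let rest := PySem.Str.strip (PySem.Str.slice line (some 8) none)
    (caption, image_text, some "caption", if rest = "" then [] else [rest])
  else if PySem.Str.startswith line "text:" then
    let caption := if current_key = some "caption" then PySem.Str.strip (PySem.Str.join "\n" current_lines) else caption
    let rest := PySem.Str.strip (PySem.Str.slice line (some 5) none)
    (caption, image_text, some "text", if rest = "" then [] else [rest])
  else
    (caption, image_text, current_key, current_lines ++ [line])

def parse_instagram_template (template_str : String) : String × String :=
  let st := (PySem.Str.splitlines template_str).foldl pvAStep ("", "", none, [])
  let (caption, image_text, current_key, current_lines) := st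
  let caption := if current_key = some "caption" then PySem.Str.strip (PySem.Str.join "\n" current_lines) else caption
  let image_text := if current_key = some "text" then PySem.Str.strip (PySem.Str.join "\n" current_lines) else image_text
  let caption := if caption = "" ∧ image_text = "" then PySem.Str.strip template_str else caption
  (caption, image_text)

-- ===== PORT B =====
-- blocks[-1][1].append(line) (no-op on empty blocks, matching the 'elif blocks' guard)
def pvAppendLast (line : String) : List (String × List String) → List (String × List String)
  | [] => []
  | [(k, ls)] => [(k, ls ++ [line])]
  | b :: bs => b :: pvAppendLast line bs

def pvBStep (blocks : List (String × List String)) (line : String) : List (String × List String) :=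
  if PySem.Str.startswith line "caption:" then
    let rest := PySem.Str.strip (PySem.Str.slice line (some 8) none)
    blocks ++ [("caption", if rest = "" then [] else [rest])]
  else if PySem.Str.startswith line "text:" then
    let rest := PySem.Str.strip (PySem.Str.slice line (some 5) none)
    blocks ++ [("text", if rest = "" then [] else [rest])]
  else
    pvAppendLast line blocks

-- 'for k, lines in reversed(blocks): if k == key: return …' — applied to blocks.reverse
def pvLastValue (key : String) : List (String × List String) → String
  | [] => ""
  | (k, ls) :: rest => if k = key then PySem.Str.strip (PySem.Str.join "\n" ls) else pvLastValue key rest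

def parse_instagram_template_alt (template_str : String) : String × String :=
  let blocks := (PySem.Str.splitlines template_str).foldl pvBStep []
  let caption := pvLastValue "caption" blocks.reverse
  let image_text := pvLastValue "text" blocks.reverse
  if caption = "" ∧ image_text = "" then (PySem.Str.strip template_str, image_text)
  else (caption, image_text)

-- ===== PRECONDITION & SPEC =====
def Spec_parse_instagram_template (template_str : String) (out : String × String) : Prop := out = parse_instagram_template_alt template_str
instance (template_str : String) (out : String × String) : Decidable (Spec_parse_instagram_template template_str out) := by unfold Spec_parse_instagram_template; infer_instance

-- ===== CLAIM (what is proved, stated in full; the proofs are below) =====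
def Claim_equal_parse_instagram_template : Prop := ∀ (template_str : String), Dom_parse_instagram_template template_str → Spec_parse_instagram_template template_str (parse_instagram_template template_str)

-- ===== LEMMAS AND PROOFS =====

-- invariant tying A's fold state to B's block list
def pvInv (st : String × String × Option String × List String)
    (blocks : List (String × List String)) : Prop :=
  (st.2.2.1 = none ∧ blocks = [] ∧ st.1 = "" ∧ st.2.1 = "")
  ∨ (∃ bs, st.2.2.1 = some "caption" ∧ blocks = bs ++ [("caption", st.2.2.2)]
        ∧ st.2.1 = pvLastValue "text" bs.reverse)
  ∨ (∃ bs, st.2.2.1 = some "text" ∧ blocks = bs ++ [("text", st.2.2.2)]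
        ∧ st.1 = pvLastValue "caption" bs.reverse)

theorem pvAppendLast_snoc (line : String) (bs : List (String × List String)) (k : String) (ls : List String) :
    pvAppendLast line (bs ++ [(k, ls)]) = bs ++ [(k, ls ++ [line])] := by
  induction bs with
  | nil => simp [pvAppendLast]
  | cons b bs ih =>
    cases bs with
    | nil => simp [pvAppendLast]
    | cons b' bs' => simpa [pvAppendLast] using ih

theorem pvInv_step (st : String × String × Option String × List String)
    (blocks : List (String × List String)) (line : String) (h : pvInv st blocks) :
    pvInv (pvAStep st line) (pvBStep blocks line) := by
  obtain ⟨c, t, key, cur⟩ := st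
  by_cases hc : PySem.Str.startswith line "caption:"
  · rcases h with ⟨hk, hb, h1, h2⟩ | ⟨bs, hk, hb, h2⟩ | ⟨bs, hk, hb, h1⟩
    · subst hb
      refine Or.inr (Or.inl ⟨[], ?_, ?_, ?_⟩) <;> simp_all [pvAStep, pvBStep, pvLastValue]
    · subst hb
      refine Or.inr (Or.inl ⟨bs ++ [("caption", cur)], ?_, ?_, ?_⟩) <;>
        simp_all [pvAStep, pvBStep, pvLastValue]
    · subst hb
      refine Or.inr (Or.inl ⟨bs ++ [("text", cur)], ?_, ?_, ?_⟩) <;>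
        simp_all [pvAStep, pvBStep, pvLastValue]
  · by_cases ht : PySem.Str.startswith line "text:"
    · rcases h with ⟨hk, hb, h1, h2⟩ | ⟨bs, hk, hb, h2⟩ | ⟨bs, hk, hb, h1⟩
      · subst hb
        refine Or.inr (Or.inr ⟨[], ?_, ?_, ?_⟩) <;> simp_all [pvAStep, pvBStep, pvLastValue]
      · subst hb
        refine Or.inr (Or.inr ⟨bs ++ [("caption", cur)], ?_, ?_, ?_⟩) <;>
          simp_all [pvAStep, pvBStep, pvLastValue]
      · subst hb
        refine Or.inr (Or.inr ⟨bs ++ [("text", cur)], ?_, ?_, ?_⟩) <;>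
          simp_all [pvAStep, pvBStep, pvLastValue]
    · rcases h with ⟨hk, hb, h1, h2⟩ | ⟨bs, hk, hb, h2⟩ | ⟨bs, hk, hb, h1⟩
      · subst hb
        refine Or.inl ⟨?_, ?_, ?_, ?_⟩ <;> simp_all [pvAStep, pvBStep, pvAppendLast]
      · subst hb
        refine Or.inr (Or.inl ⟨bs, ?_, ?_, ?_⟩) <;>
          simp_all [pvAStep, pvBStep, pvAppendLast_snoc]
      · subst hb
        refine Or.inr (Or.inr ⟨bs, ?_, ?_, ?_⟩) <;>
          simp_all [pvAStep, pvBStep, pvAppendLast_snoc]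

theorem pvInv_foldl (lines : List String) (st : String × String × Option String × List String)
    (blocks : List (String × List String)) (h : pvInv st blocks) :
    pvInv (lines.foldl pvAStep st) (lines.foldl pvBStep blocks) := by
  induction lines generalizing st blocks with
  | nil => exact h
  | cons l ls ih => exact ih _ _ (pvInv_step _ _ _ h)

-- ===== VERDICT (by name: the statement is the Claim_ definition above) =====
theorem parse_instagram_template_spec : Claim_equal_parse_instagram_template := by
  intro template_str _
  have h := pvInv_foldl (PySem.Str.splitlines template_str) ("", "", none, []) []
    (Or.inl ⟨rfl, rfl, rfl, rfl⟩)
  simp only [Spec_parse_instagram_template, parse_instagram_template, parse_instagram_template_alt]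
  revert h
  generalize (PySem.Str.splitlines template_str).foldl pvAStep ("", "", none, []) = st
  generalize (PySem.Str.splitlines template_str).foldl pvBStep [] = blocks
  obtain ⟨c, t, key, cur⟩ := st
  intro h
  rcases h with ⟨hk, hb, h1, h2⟩ | ⟨bs, hk, hb, h2⟩ | ⟨bs, hk, hb, h1⟩ <;>
    subst hb <;> simp_all [pvLastValue] <;>
    split_ifs with hif <;> simp_all
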